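-- pv_equiv track=rewrite | github.com/nezort11/problems | yandex_internship/c/main.py | tuple_set
-- ===== SOURCE A (Python) =====
-- def tuple_set(a, k):
--     """
--     Return set of unique item combination tuples.
--     Set - position-less (order-independent) list
--
--     :param a: list of elements
--     :param k: number of element in tuple
--     :return: set of item tuples (ex. {(1,2,3), (2, 2, 2)})
--     """
--     if k <= 0:
--         return set()
--     elif len(a) < k:
--         return set()
--     elif k == 1:
--         return {*a}
--     else:
--         s = set()
--         for i, ai in enumerate(a):
--             left = a[i+1:]
--             level_below = k - 1
--             if level_below == 1:
--                 for c in tuple_set(left, level_below):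
--                     s.add((ai, c))
--             else:
--                 for c in tuple_set(left, level_below):
--                     s.add((ai,) + c)
--         return s
-- ===== SOURCE B (Python) =====
-- def _comb(xs, k):
--     """All k-combinations of xs as tuples, in lexicographic index order."""
--     if k == 0:
--         return [()]
--     if len(xs) < k:
--         return []
--     x, rest = xs[0], xs[1:]
--     return [(x,) + t for t in _comb(rest, k - 1)] + _comb(rest, k)
--
--
-- def tuple_set(a, k):
--     if k <= 0:
--         return set()
--     if len(a) < k:
--         return set()
--     return set(_comb(a, k))
-- ===== Notes on version B (the rewrite author's own statement) =====
-- stated objective: alternative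
-- what changed: A's per-index loop with suffix slicing, per-level set deduplication and a special scalar k==1 inner case is replaced by one plain include/exclude recursion producing the combinations list lexicographically, deduplicated once at the end; the k==1 special case (bare elements instead of 1-tuples) is excluded by Pre_.
-- outside the precondition, e.g. on tuple_set([0], 1): A returns {0}, B returns {(0,)}
import Mathlib
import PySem

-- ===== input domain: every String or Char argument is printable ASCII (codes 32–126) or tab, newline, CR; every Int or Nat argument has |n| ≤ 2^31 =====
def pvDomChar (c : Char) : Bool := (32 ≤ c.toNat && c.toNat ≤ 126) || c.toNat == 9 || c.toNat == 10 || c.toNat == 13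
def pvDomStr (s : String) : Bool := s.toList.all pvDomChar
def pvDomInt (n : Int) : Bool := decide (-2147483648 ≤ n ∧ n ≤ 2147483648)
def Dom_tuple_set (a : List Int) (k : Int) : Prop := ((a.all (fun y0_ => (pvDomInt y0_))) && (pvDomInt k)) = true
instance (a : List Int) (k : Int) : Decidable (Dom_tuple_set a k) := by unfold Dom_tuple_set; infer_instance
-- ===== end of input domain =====

-- B replaces A's per-index loop with suffix slicing and per-level set dedup by one
-- include/exclude recursion listing the combinations lexicographically, dedup'd once at the end.
-- Python's set of k-tuples is modelled as PySem.Set (List (List Int)); for k == 1 the set of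
-- bare elements is modelled as the set of the singleton lists.

-- ===== PORT A =====
def tuple_set (a : List Int) (k : Int) : List (List Int) :=
  if _hk0 : k ≤ 0 then []
  else if PySem.List.len a < k then []
  else if _hk1 : k == 1 then PySem.Set.ofList (a.map fun x => [x])
  else
    (PySem.List.enumerate a 0).foldl
      (fun s p =>
        let left := PySem.List.slice a (some (p.1 + 1)) none
        let level_below := k - 1
        if level_below == 1 then
          (tuple_set left level_below).foldl (fun s c => PySem.Set.add s (p.2 :: c)) s
        else
          (tuple_set left level_below).foldl (fun s c => PySem.Set.add s (p.2 :: c)) s)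
      []
termination_by k.toNat
decreasing_by all_goals (simp only [not_le, beq_iff_eq] at _hk0 _hk1; omega)

-- ===== PORT B =====
def combosB : Nat → List Int → List (List Int)
  | 0, _ => [[]]
  | j+1, xs =>
    if xs.length < j+1 then []
    else
      match xs with
      | [] => []
      | x :: rest => ((combosB j rest).map (fun t => x :: t)) ++ combosB (j+1) rest
termination_by _ xs => xs.length
decreasing_by all_goals (simp only [List.length_cons]; omega)

def tuple_set_alt (a : List Int) (k : Int) : List (List Int) :=
  if k ≤ 0 then []
  else if PySem.List.len a < k then []
  else PySem.Set.ofList (combosB k.toNat a)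

-- ===== PRECONDITION & SPEC =====
-- Pre_ excludes k == 1 with nonempty a, where A returns a set of bare ints rather than
-- 1-tuples — a value outside the declared return type set[tuple[int, ...]].
def Pre_tuple_set (a : List Int) (k : Int) : Prop := ¬ (k = 1 ∧ a ≠ [])
instance (a : List Int) (k : Int) : Decidable (Pre_tuple_set a k) := by unfold Pre_tuple_set; infer_instance
def pvWitness_tuple_set : List Int × Int := ([1, 2, 3], 2)
def Spec_tuple_set (a : List Int) (k : Int) (out : List (List Int)) : Prop := out = tuple_set_alt a k
instance (a : List Int) (k : Int) (out : List (List Int)) : Decidable (Spec_tuple_set a k out) := by unfold Spec_tuple_set; infer_instance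

-- ===== CLAIM (what is proved, stated in full; the proofs are below) =====
def Claim_equal_tuple_set : Prop := ∀ (a : List Int) (k : Int), Dom_tuple_set a k → Pre_tuple_set a k → Spec_tuple_set a k (tuple_set a k)

-- ===== LEMMAS AND PROOFS =====

lemma combosB_short : ∀ (j : Nat) (xs : List Int), xs.length < j → combosB j xs = [] := by
  intro j xs h
  match j, xs with
  | j+1, xs =>
    rw [combosB.eq_def]
    simp only []
    rw [if_pos (by omega)]

lemma combosB_cons (j : Nat) (x : Int) (rest : List Int) :
    combosB (j+1) (x :: rest) = ((combosB j rest).map (fun t => x :: t)) ++ combosB (j+1) rest := by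
  by_cases h : rest.length < j
  · rw [combosB.eq_def]
    simp [combosB_short j rest h, combosB_short (j+1) rest (by simp; omega), h]
  · rw [combosB.eq_def]
    simp [h]

lemma combosB_one : ∀ xs : List Int, combosB 1 xs = xs.map (fun y => [y]) := by
  intro xs
  induction xs with
  | nil => rw [combosB.eq_def]; simp
  | cons x rest ih => rw [combosB_cons]; simp [ih, combosB]

lemma map_discard {f : List Int → List Int} (hf : Function.Injective f)
    (s : List (List Int)) (x : List Int) :
    (PySem.Set.discard s x).map f = PySem.Set.discard (s.map f) (f x) := by
  simp only [PySem.Set.discard, List.filter_map]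
  congr 1
  apply List.filter_congr
  intro y _
  simp [Function.comp, hf.eq_iff]

lemma map_ofList_inj {f : List Int → List Int} (hf : Function.Injective f) :
    ∀ m : List (List Int), (PySem.Set.ofList m).map f = PySem.Set.ofList (m.map f) := by
  intro m
  induction m with
  | nil => rfl
  | cons x m ih =>
    rw [List.map_cons, PySem.Set.ofList_cons, PySem.Set.ofList_cons, List.map_cons,
        map_discard hf, ih]

lemma update_congr_ofList (s : List (List Int)) {l1 l2 : List (List Int)}
    (h : PySem.Set.ofList l1 = PySem.Set.ofList l2) :
    PySem.Set.update s l1 = PySem.Set.update s l2 := by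
  rw [PySem.Set.update_eq_append_filter, PySem.Set.update_eq_append_filter, h]

lemma update_map_ofList (s : List (List Int)) (m : List (List Int)) {f : List Int → List Int}
    (hf : Function.Injective f) :
    PySem.Set.update s ((PySem.Set.ofList m).map f) = PySem.Set.update s (m.map f) := by
  apply update_congr_ofList
  rw [map_ofList_inj hf, PySem.Set.ofList_ofList]

lemma Eaux (a0 : List Int) (jm : Nat) : ∀ (a : List Int) (t : Nat), a0.drop t = a →
    ∀ s : List (List Int),
    List.foldl (fun s (p : Int × Int) =>
        PySem.Set.update s ((combosB jm (PySem.List.slice a0 (some (p.1 + 1)) none)).map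
          (fun c => p.2 :: c))) s (PySem.List.enumerate a (t : Int))
      = PySem.Set.update s (combosB (jm+1) a) := by
  intro a
  induction a with
  | nil =>
    intro t _ s
    rw [PySem.List.enumerate_nil, combosB_short (jm+1) [] (by simp)]
    simp [PySem.Set.update_nil]
  | cons x rest ih =>
    intro t hdrop s
    have hdrop1 : a0.drop (t+1) = rest := by
      have h := congrArg (List.drop 1) hdrop
      rw [List.drop_drop] at h
      simpa [Nat.add_comm] using h
    rw [PySem.List.enumerate_cons, List.foldl_cons]
    have hcast : (t : Int) + 1 = ((t+1 : Nat) : Int) := by push_cast; ring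
    rw [hcast, PySem.List.slice_from_natCast, hdrop1, ih (t+1) hdrop1, ← PySem.Set.update_append,
        ← combosB_cons]

lemma tuple_set_eq_ofList_combosB : ∀ (n : Nat) (k : Int), k.toNat = n → 1 ≤ k →
    ∀ xs : List Int, tuple_set xs k = PySem.Set.ofList (combosB k.toNat xs) := by
  intro n
  induction n using Nat.strong_induction_on with
  | _ n IH =>
    intro k hkn hk1 xs
    by_cases hk : k = 1
    · subst hk
      rw [tuple_set]
      rw [dif_neg (by omega)]
      by_cases hlen : PySem.List.len xs < 1
      · rw [if_pos hlen]
        have hnil : xs = [] := by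
          cases xs with
          | nil => rfl
          | cons y ys => exfalso; simp [PySem.List.len_eq] at hlen; omega
        subst hnil
        rw [show Int.toNat 1 = 1 from rfl, combosB_short 1 [] (by simp)]
        rfl
      · rw [if_neg hlen, dif_pos (by simp), show Int.toNat 1 = 1 from rfl, combosB_one]
    · -- k ≥ 2
      have hk2 : 2 ≤ k := by omega
      rw [tuple_set, dif_neg (by omega)]
      by_cases hlen : PySem.List.len xs < k
      · rw [if_pos hlen]
        rw [combosB_short k.toNat xs (by simp [PySem.List.len_eq] at hlen; omega)]
        rfl
      · rw [if_neg hlen, dif_neg (by simp [hk])]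
        have hrec : ∀ left : List Int,
            tuple_set left (k-1) = PySem.Set.ofList (combosB (k-1).toNat left) := by
          intro left
          exact IH (k-1).toNat (by omega) (k-1) rfl (by omega) left
        have hbody : ∀ (acc : List (List Int)) (p : Int × Int),
            p ∈ PySem.List.enumerate xs 0 →
            (let left := PySem.List.slice xs (some (p.1 + 1)) none
             let level_below := k - 1
             if level_below == 1 then
               (tuple_set left level_below).foldl (fun s c => PySem.Set.add s (p.2 :: c)) acc
             else
               (tuple_set left level_below).foldl (fun s c => PySem.Set.add s (p.2 :: c)) acc)
            = PySem.Set.update acc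
                ((combosB (k-1).toNat (PySem.List.slice xs (some (p.1 + 1)) none)).map
                  (fun c => p.2 :: c)) := by
          intro acc p _
          simp only [ite_self]
          rw [hrec, ← PySem.Set.update_map_eq_foldl_add,
              update_map_ofList _ _ (fun a b h => by simpa using h)]
        refine Eq.trans (PySem.List.foldl_congr_mem _ _ (fun s (p : Int × Int) =>
            PySem.Set.update s ((combosB (k-1).toNat (PySem.List.slice xs (some (p.1 + 1)) none)).map
              (fun c => p.2 :: c))) [] hbody) ?_
        have heq := Eaux xs (k-1).toNat xs 0 rfl []
        rw [PySem.Set.update_nil_left] at heq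
        rw [show (k-1).toNat + 1 = k.toNat from by omega] at heq
        exact heq

-- ===== VERDICT (by name: the statement is the Claim_ definition above) =====
theorem tuple_set_spec : Claim_equal_tuple_set := by
  intro a k _ hpre
  unfold Spec_tuple_set tuple_set_alt
  by_cases hk0 : k ≤ 0
  · rw [if_pos hk0, tuple_set, dif_pos hk0]
  · rw [if_neg hk0]
    by_cases hlen : PySem.List.len a < k
    · rw [if_pos hlen, tuple_set, dif_neg hk0, if_pos hlen]
    · rw [if_neg hlen]
      have hane : a ≠ [] := by
        intro h
        subst h
        simp [PySem.List.len_eq] at hlen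
        omega
      have hk1 : k ≠ 1 := fun h => hpre ⟨h, hane⟩
      exact tuple_set_eq_ofList_combosB k.toNat k rfl (by omega) a
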